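-- pv_equiv track=rewrite | github.com/ikko1250/ISEP_general | analyze_text_sudachi.py | check_near
-- ===== SOURCE A (Python) =====
-- def check_near(words, surfaces, dict_forms, distance, backward=False):
--     """
--     near構文の判定: 複数の単語が指定距離内に出現するか
--     """
--     all_terms = surfaces + dict_forms
--
--     # 各単語の出現位置を取得
--     positions = {}
--     for word in words:
--         positions[word] = []
--         for i, term in enumerate(all_terms):
--             if word in term or term in word:
--                 positions[word].append(i)
--
--     # すべての単語が出現しているか確認
--     if not all(positions[word] for word in words):
--         return False
--
--     # 任意の組み合わせで距離条件を満たすか確認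
--     for i, word1 in enumerate(words[:-1]):
--         for pos1 in positions[word1]:
--             for word2 in words[i+1:]:
--                 for pos2 in positions[word2]:
--                     if backward:
--                         # 後方検索: word2がword1より前にあり、距離以内
--                         if pos2 < pos1 and pos1 - pos2 <= distance:
--                             return True
--                     else:
--                         # 前方検索: word2がword1より後にあり、距離以内
--                         if pos2 > pos1 and pos2 - pos1 <= distance:
--                             return True
--
--     return False
-- ===== SOURCE B (Python) =====
-- def _sweep(a, b, distance):
--     # exists i < j with a[i], b[j] and j - i <= distance (single left-to-right sweep)
--     last = None
--     for j, (ha, hb) in enumerate(zip(a, b)):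
--         if hb and last is not None and j - last <= distance:
--             return True
--         if ha:
--             last = j
--     return False
--
--
-- def check_near(words, surfaces, dict_forms, distance, backward=False):
--     all_terms = surfaces + dict_forms
--     # one boolean match-mask per word over the token sequence
--     flags = [[w in t or t in w for t in all_terms] for w in words]
--     if not all(any(f) for f in flags):
--         return False
--     work = flags
--     while len(work) > 1:
--         f1, work = work[0], work[1:]
--         for f2 in work:
--             a, b = (f2, f1) if backward else (f1, f2)
--             if _sweep(a, b, distance):
--                 return True
--     return False
-- ===== Notes on version B (the rewrite author's own statement) =====
-- stated objective: alternative
-- what changed: B replaces A's per-word position lists plus cross-product scan over every position pair by per-word boolean match-masks and, for each word pair, a single left-to-right sweep that remembers only the last index where the first word matched.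
import Mathlib
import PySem

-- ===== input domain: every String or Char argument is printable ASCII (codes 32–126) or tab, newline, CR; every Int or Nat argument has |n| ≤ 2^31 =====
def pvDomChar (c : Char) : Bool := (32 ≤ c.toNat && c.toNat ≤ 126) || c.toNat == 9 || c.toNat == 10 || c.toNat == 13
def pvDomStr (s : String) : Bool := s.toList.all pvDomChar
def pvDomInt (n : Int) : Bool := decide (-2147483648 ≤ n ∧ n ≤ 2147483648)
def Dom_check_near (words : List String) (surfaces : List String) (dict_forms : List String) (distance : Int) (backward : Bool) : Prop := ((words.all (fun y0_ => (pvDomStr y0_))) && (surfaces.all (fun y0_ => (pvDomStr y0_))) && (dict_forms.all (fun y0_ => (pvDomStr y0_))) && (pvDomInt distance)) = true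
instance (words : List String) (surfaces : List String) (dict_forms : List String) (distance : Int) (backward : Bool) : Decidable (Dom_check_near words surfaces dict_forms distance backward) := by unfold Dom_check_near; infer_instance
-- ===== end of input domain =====

-- B replaces A's per-word position lists and cross-product pair scan by boolean match-masks
-- and a single left-to-right sweep per word pair (objective: alternative algorithm, same cost).

-- shared helper: Python's `word in term or term in word` (the same test both sources perform)
def matchB (w t : String) : Bool := PySem.Str.isIn w t || PySem.Str.isIn t w

-- ===== PORT A =====
def check_near (words : List String) (surfaces : List String) (dict_forms : List String) (distance : Int) (backward : Bool) : Bool :=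
  let all_terms := surfaces ++ dict_forms
  let positions : PySem.Dict String (List Int) :=
    words.foldl (fun d word =>
      d.insert word ((PySem.List.enumerate all_terms).foldl
        (fun ps it => if matchB word it.2 then ps ++ [it.1] else ps) [])) PySem.Dict.empty
  if !(words.all fun word => !(positions.getD word []).isEmpty) then false
  else
    (PySem.List.enumerate (PySem.List.slice words none (some (-1)))).any fun iw =>
      (positions.getD iw.2 []).any fun pos1 =>
        (PySem.List.slice words (some (iw.1 + 1)) none).any fun word2 =>
          (positions.getD word2 []).any fun pos2 =>
            if backward then decide (pos2 < pos1) && decide (pos1 - pos2 ≤ distance)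
            else decide (pos2 > pos1) && decide (pos2 - pos1 ≤ distance)

-- ===== PORT B =====
-- _sweep: one pass over the zipped masks, remembering only the last index where the first mask hit
def lastOk (last : Option Int) (j distance : Int) : Bool :=
  match last with | some l => decide (j - l ≤ distance) | none => false

def sweepAux (pairs : List (Bool × Bool)) (j : Int) (last : Option Int) (distance : Int) : Bool :=
  match pairs with
  | [] => false
  | (ha, hb) :: rest =>
    if hb && lastOk last j distance then true
    else sweepAux rest (j + 1) (if ha then some j else last) distance

def sweep (a b : List Bool) (distance : Int) : Bool := sweepAux (a.zip b) 0 none distance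

-- the `while len(work) > 1` loop of B
def pairsAny (work : List (List Bool)) (distance : Int) (backward : Bool) : Bool :=
  match work with
  | [] => false
  | f1 :: rest =>
    if rest.any (fun f2 => if backward then sweep f2 f1 distance else sweep f1 f2 distance) then true
    else pairsAny rest distance backward

def check_near_alt (words : List String) (surfaces : List String) (dict_forms : List String) (distance : Int) (backward : Bool) : Bool :=
  let all_terms := surfaces ++ dict_forms
  let flags := words.map (fun w => all_terms.map (fun t => matchB w t))
  if !(flags.all fun f => f.any id) then false
  else pairsAny flags distance backward

-- ===== PRECONDITION & SPEC =====
def Spec_check_near (words : List String) (surfaces : List String) (dict_forms : List String) (distance : Int) (backward : Bool) (out : Bool) : Prop := out = check_near_alt words surfaces dict_forms distance backward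
instance (words : List String) (surfaces : List String) (dict_forms : List String) (distance : Int) (backward : Bool) (out : Bool) : Decidable (Spec_check_near words surfaces dict_forms distance backward out) := by unfold Spec_check_near; infer_instance

-- ===== CLAIM (what is proved, stated in full; the proofs are below) =====
def Claim_equal_check_near : Prop := ∀ (words : List String) (surfaces : List String) (dict_forms : List String) (distance : Int) (backward : Bool), Dom_check_near words surfaces dict_forms distance backward → Spec_check_near words surfaces dict_forms distance backward (check_near words surfaces dict_forms distance backward)

-- ===== LEMMAS AND PROOFS =====

-- the position list A stores for a word (the value its inner loop builds)
def posIdx (w : String) (ts : List String) : List Int :=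
  (PySem.List.enumerate ts).foldl (fun ps it => if matchB w it.2 then ps ++ [it.1] else ps) []

-- the match mask B stores for a word
def flagsOf (ts : List String) (w : String) : List Bool := ts.map (matchB w)

-- the common meaning of both pair phases
def NearProp (words ts : List String) (d : Int) (bw : Bool) : Prop :=
  ∃ i j : Nat, i < j ∧ ∃ hj : j < words.length, ∃ hi : i < words.length,
    ∃ p ∈ posIdx words[i] ts, ∃ q ∈ posIdx words[j] ts,
      (if bw then q < p ∧ p - q ≤ d else p < q ∧ q - p ≤ d)

lemma posIdx_eq (w : String) (ts : List String) :
    posIdx w ts = ((PySem.List.enumerate ts).filter (fun it => matchB w it.2)).map (·.1) := by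
  simpa [posIdx] using PySem.List.foldl_append_if (fun it => matchB w it.2) (·.1) (PySem.List.enumerate ts) []

lemma mem_posIdx (w : String) (ts : List String) (p : Int) :
    p ∈ posIdx w ts ↔ ∃ k : Nat, ∃ h : k < ts.length, p = (k : Int) ∧ matchB w ts[k] = true := by
  simp only [posIdx_eq, List.mem_map, List.mem_filter, PySem.List.mem_enumerate_iff]
  constructor
  · rintro ⟨⟨i, t⟩, ⟨⟨k, hk, heq⟩, hm⟩, rfl⟩
    obtain ⟨h1, h2⟩ := Prod.mk.injEq .. ▸ heq
    exact ⟨k, hk, by simp_all⟩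
  · rintro ⟨k, hk, rfl, hm⟩
    exact ⟨((k : Int), ts[k]), ⟨⟨k, hk, by simp⟩, hm⟩, rfl⟩

lemma getD_foldl_insert_not_mem (f : String → List Int) (l : List String)
    (d : PySem.Dict String (List Int)) (w : String) (hw : w ∉ l) :
    (l.foldl (fun d x => d.insert x (f x)) d).getD w [] = d.getD w [] := by
  induction l generalizing d with
  | nil => rfl
  | cons a t ih =>
    simp only [List.foldl_cons]
    rw [ih _ (fun h => hw (List.mem_cons_of_mem _ h))]
    exact PySem.Dict.getD_insert_of_ne d (f a) [] (fun h => hw (h ▸ List.mem_cons_self))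

lemma getD_foldl_insert_mem (f : String → List Int) (l : List String)
    (d : PySem.Dict String (List Int)) (w : String) (hw : w ∈ l) :
    (l.foldl (fun d x => d.insert x (f x)) d).getD w [] = f w := by
  induction l generalizing d with
  | nil => cases hw
  | cons a t ih =>
    simp only [List.foldl_cons]
    by_cases h : w ∈ t
    · exact ih _ h
    · have : w = a := (List.mem_cons.1 hw).resolve_right h
      rw [getD_foldl_insert_not_mem f t _ w h, this, PySem.Dict.getD_insert_self]

lemma posIdx_isEmpty_iff (w : String) (ts : List String) :
    ((posIdx w ts).isEmpty = false) ↔ ((flagsOf ts w).any id = true) := by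
  rw [List.isEmpty_eq_false_iff]
  constructor
  · intro h
    obtain ⟨p, hp⟩ := List.exists_mem_of_ne_nil _ h
    obtain ⟨k, hk, rfl, hm⟩ := (mem_posIdx w ts p).1 hp
    simp only [flagsOf, List.any_eq_true, List.mem_map]
    exact ⟨matchB w ts[k], ⟨ts[k], List.getElem_mem hk, rfl⟩, hm⟩
  · intro h
    simp only [flagsOf, List.any_eq_true, List.mem_map] at h
    obtain ⟨b, ⟨t, ht, rfl⟩, hb⟩ := h
    obtain ⟨k, hk, rfl⟩ := List.mem_iff_getElem.1 ht
    exact List.ne_nil_of_mem ((mem_posIdx w ts (k : Int)).2 ⟨k, hk, rfl, by simpa using hb⟩)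

lemma sweepAux_eq_true_iff (d : Int) (pairs : List (Bool × Bool)) (j : Int) (last : Option Int)
    (hl : ∀ l, last = some l → l < j) :
    sweepAux pairs j last d = true ↔
      ∃ k : Nat, ∃ hk : k < pairs.length, (pairs[k]).2 = true ∧
        ((∃ m : Nat, ∃ hm : m < pairs.length, m < k ∧ (pairs[m]).1 = true ∧ (k : Int) - (m : Int) ≤ d)
         ∨ (∃ l : Int, last = some l ∧ (j + (k : Int)) - l ≤ d)) := by
  induction pairs generalizing j last with
  | nil => simp [sweepAux]
  | cons hd rest ih =>
    obtain ⟨ha, hb⟩ := hd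
    have hrw : sweepAux ((ha, hb) :: rest) j last d =
        (if hb && lastOk last j d then true
         else sweepAux rest (j + 1) (if ha then some j else last) d) := rfl
    rw [hrw]
    by_cases hguard : (hb && lastOk last j d) = true
    · simp only [hguard, if_true, true_iff]
      obtain ⟨hb', hc⟩ := Bool.and_eq_true_iff.1 hguard
      match last, hc with
      | some l, hc =>
        refine ⟨0, by simp, by simpa using hb', Or.inr ⟨l, rfl, ?_⟩⟩
        simpa using of_decide_eq_true (by simpa [lastOk] using hc)
    · rw [if_neg hguard]
      have hl' : ∀ l, (if ha then some j else last) = some l → l < j + 1 := by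
        intro l h
        by_cases hha : ha = true
        · simp [hha] at h; omega
        · simp [hha] at h; exact lt_trans (hl l h) (by omega)
      rw [ih (j + 1) _ hl']
      constructor
      · rintro ⟨k, hk, hb2, hrest⟩
        refine ⟨k + 1, by simpa using Nat.succ_lt_succ hk, by simpa using hb2, ?_⟩
        rcases hrest with ⟨m, hm, hmk, hma, hd'⟩ | ⟨l, hsome, hd'⟩
        · exact Or.inl ⟨m + 1, by simpa using Nat.succ_lt_succ hm, by omega, by simpa using hma, by push_cast; omega⟩
        · by_cases hha : ha = true
          · simp [hha] at hsome
            exact Or.inl ⟨0, by simp, by omega, by simpa using hha, by push_cast; omega⟩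
          · simp [hha] at hsome
            exact Or.inr ⟨l, hsome, by push_cast at hd' ⊢; omega⟩
      · rintro ⟨k, hk, hb2, hrest⟩
        match k with
        | 0 =>
          exfalso
          rcases hrest with ⟨m, hm, hmk, _, _⟩ | ⟨l, hsome, hd'⟩
          · omega
          · apply hguard
            rw [hsome]
            simp only [List.getElem_cons_zero] at hb2
            simp only [hb2, Bool.true_and, lastOk, decide_eq_true_eq]
            omega
        | k' + 1 =>
          refine ⟨k', by simpa using Nat.lt_of_succ_lt_succ hk, by simpa using hb2, ?_⟩
          rcases hrest with ⟨m, hm, hmk, hma, hd'⟩ | ⟨l, hsome, hd'⟩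
          · match m with
            | 0 =>
              simp only [List.getElem_cons_zero] at hma
              refine Or.inr ⟨j, by simp [hma], by push_cast at hd' ⊢; omega⟩
            | m' + 1 =>
              exact Or.inl ⟨m', by simpa using Nat.lt_of_succ_lt_succ hm, by omega, by simpa using hma, by push_cast at hd' ⊢; omega⟩
          · by_cases hha : ha = true
            · have hlj : l < j := hl l hsome
              refine Or.inr ⟨j, by simp [hha], by push_cast at hd' ⊢; omega⟩
            · refine Or.inr ⟨l, by simp [hha, hsome], by push_cast at hd' ⊢; omega⟩

lemma sweep_flags_iff (ts : List String) (w1 w2 : String) (d : Int) :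
    sweep (flagsOf ts w1) (flagsOf ts w2) d = true ↔
      ∃ p ∈ posIdx w1 ts, ∃ q ∈ posIdx w2 ts, p < q ∧ q - p ≤ d := by
  rw [sweep, sweepAux_eq_true_iff d _ 0 none (by simp)]
  have hlen : ((flagsOf ts w1).zip (flagsOf ts w2)).length = ts.length := by
    simp [flagsOf]
  constructor
  · rintro ⟨k, hk, hb2, h⟩
    rcases h with ⟨m, hm, hmk, hma, hd'⟩ | ⟨l, hl, _⟩
    · have hk' : k < ts.length := by omega
      have hm' : m < ts.length := by omega
      refine ⟨(m : Int), (mem_posIdx _ _ _).2 ⟨m, hm', rfl, ?_⟩,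
              (k : Int), (mem_posIdx _ _ _).2 ⟨k, hk', rfl, ?_⟩, by exact_mod_cast hmk, hd'⟩
      · simpa [List.getElem_zip, flagsOf] using hma
      · simpa [List.getElem_zip, flagsOf] using hb2
    · cases hl
  · rintro ⟨p, hp, q, hq, hpq, hd'⟩
    obtain ⟨m, hm, rfl, hma⟩ := (mem_posIdx _ _ _).1 hp
    obtain ⟨k, hk, rfl, hkb⟩ := (mem_posIdx _ _ _).1 hq
    have hmk : m < k := by exact_mod_cast hpq
    refine ⟨k, by omega, by simpa [List.getElem_zip, flagsOf] using hkb,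
            Or.inl ⟨m, by omega, hmk, by simpa [List.getElem_zip, flagsOf] using hma, hd'⟩⟩

lemma pairsAny_iff (L : List (List Bool)) (d : Int) (bw : Bool) :
    pairsAny L d bw = true ↔
      ∃ i j : Nat, i < j ∧ ∃ hj : j < L.length, ∃ hi : i < L.length,
        (if bw then sweep L[j] L[i] d else sweep L[i] L[j] d) = true := by
  induction L with
  | nil => simp [pairsAny]
  | cons f rest ih =>
    have hrw : pairsAny (f :: rest) d bw =
        (if rest.any (fun f2 => if bw then sweep f2 f d else sweep f f2 d) then true
         else pairsAny rest d bw) := rfl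
    rw [hrw]
    by_cases hany : rest.any (fun f2 => if bw then sweep f2 f d else sweep f f2 d) = true
    · simp only [hany, if_true, true_iff]
      obtain ⟨f2, hf2, hg⟩ := List.any_eq_true.1 hany
      obtain ⟨j', hj', rfl⟩ := List.mem_iff_getElem.1 hf2
      exact ⟨0, j' + 1, Nat.succ_pos _, by simpa using Nat.succ_lt_succ hj', by simp,
             by simpa using hg⟩
    · rw [if_neg hany, ih]
      constructor
      · rintro ⟨i, j, hij, hj, hi, hc⟩
        exact ⟨i + 1, j + 1, by omega, by simpa using Nat.succ_lt_succ hj,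
               by simpa using Nat.succ_lt_succ hi, by simpa using hc⟩
      · rintro ⟨i, j, hij, hj, hi, hc⟩
        match i, j with
        | 0, j' + 1 =>
          exfalso
          apply hany
          refine List.any_eq_true.2 ⟨(f :: rest)[j' + 1], ?_, ?_⟩
          · simp
          · simpa using hc
        | i' + 1, j' + 1 =>
          exact ⟨i', j', by omega, by simpa using Nat.lt_of_succ_lt_succ hj,
                 by simpa using Nat.lt_of_succ_lt_succ hi, by simpa using hc⟩

lemma bside_iff (words ts : List String) (d : Int) (bw : Bool) :
    pairsAny (words.map (flagsOf ts)) d bw = true ↔ NearProp words ts d bw := by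
  rw [pairsAny_iff]
  unfold NearProp
  constructor
  · rintro ⟨i, j, hij, hj, hi, hc⟩
    have hj' : j < words.length := by simpa using hj
    have hi' : i < words.length := by simpa using hi
    refine ⟨i, j, hij, hj', hi', ?_⟩
    cases bw with
    | true =>
      simp only [List.getElem_map] at hc ⊢
      obtain ⟨p, hp, q, hq, hpq, hd'⟩ := (sweep_flags_iff ts _ _ d).1 hc
      exact ⟨q, hq, p, hp, hpq, hd'⟩
    | false =>
      simp only [if_neg Bool.false_ne_true, List.getElem_map] at hc ⊢
      obtain ⟨p, hp, q, hq, hpq, hd'⟩ := (sweep_flags_iff ts _ _ d).1 hc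
      exact ⟨p, hp, q, hq, hpq, hd'⟩
  · rintro ⟨i, j, hij, hj, hi, p, hp, q, hq, hc⟩
    refine ⟨i, j, hij, by simpa using hj, by simpa using hi, ?_⟩
    cases bw with
    | true =>
      simp only [if_true] at hc ⊢
      rw [List.getElem_map, List.getElem_map]
      exact (sweep_flags_iff ts _ _ d).2 ⟨q, hq, p, hp, hc.1, hc.2⟩
    | false =>
      simp only [if_neg Bool.false_ne_true] at hc ⊢
      rw [List.getElem_map, List.getElem_map]
      exact (sweep_flags_iff ts _ _ d).2 ⟨p, hp, q, hq, hc.1, hc.2⟩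

lemma aside_iff (P : String → List Int) (words ts : List String) (d : Int) (bw : Bool)
    (hP : ∀ w ∈ words, P w = posIdx w ts) :
    ((PySem.List.enumerate (PySem.List.slice words none (some (-1)))).any fun iw =>
      (P iw.2).any fun pos1 =>
        (PySem.List.slice words (some (iw.1 + 1)) none).any fun word2 =>
          (P word2).any fun pos2 =>
            if bw then decide (pos2 < pos1) && decide (pos1 - pos2 ≤ d)
            else decide (pos2 > pos1) && decide (pos2 - pos1 ≤ d)) = true
      ↔ NearProp words ts d bw := by
  simp only [List.any_eq_true, PySem.List.slice_to_neg_one]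
  unfold NearProp
  constructor
  · rintro ⟨iw, hiw, pos1, hp1, word2, hw2, pos2, hp2, hcond⟩
    obtain ⟨i, hi, rfl⟩ := (PySem.List.mem_enumerate_iff _ _ _).1 hiw
    have hi' : i < words.length - 1 := by simpa using hi
    have hnum : (0 : Int) + (i : Int) + 1 = ((i + 1 : Nat) : Int) := by push_cast; ring
    rw [hnum, PySem.List.slice_from_natCast] at hw2
    obtain ⟨k, hk, rfl⟩ := List.mem_iff_getElem.1 hw2
    rw [List.getElem_drop] at hp2
    have hlen : i + 1 + k < words.length := by
      have := hk; simp [List.length_drop] at this; omega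
    have hidl : words.dropLast[i] = words[i] := List.getElem_dropLast ..
    rw [hidl] at hp1
    rw [hP _ (List.getElem_mem (by omega))] at hp1
    rw [hP _ (List.getElem_mem hlen)] at hp2
    refine ⟨i, i + 1 + k, by omega, hlen, by omega, pos1, hp1, pos2, hp2, ?_⟩
    cases bw with
    | true => simpa using hcond
    | false => simpa using hcond
  · rintro ⟨i, j, hij, hj, hi, p, hp, q, hq, hc⟩
    have hi1 : i < words.length - 1 := by omega
    refine ⟨((0 : Int) + (i : Int), words.dropLast[i]'(by simpa using hi1)),
            (PySem.List.mem_enumerate_iff _ _ _).2 ⟨i, by simpa using hi1, rfl⟩,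
            p, ?_, words[j], ?_, q, ?_, ?_⟩
    · rw [List.getElem_dropLast, hP _ (List.getElem_mem hi)]
      exact hp
    · have hnum : (0 : Int) + (i : Int) + 1 = ((i + 1 : Nat) : Int) := by push_cast; ring
      rw [hnum, PySem.List.slice_from_natCast]
      refine List.mem_iff_getElem.2 ⟨j - (i + 1), by simp [List.length_drop]; omega, ?_⟩
      rw [List.getElem_drop]
      congr 1
      omega
    · rw [hP _ (List.getElem_mem hj)]
      exact hq
    · cases bw with
      | true => simpa using hc
      | false => simpa using hc

-- ===== VERDICT (by name: the statement is the Claim_ definition above) =====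
theorem check_near_spec : Claim_equal_check_near := by
  intro words surfaces dict_forms distance backward _
  show check_near words surfaces dict_forms distance backward
      = check_near_alt words surfaces dict_forms distance backward
  unfold check_near check_near_alt
  dsimp only
  have hdict : ∀ w ∈ words,
      ((words.foldl (fun d word => d.insert word
          ((PySem.List.enumerate (surfaces ++ dict_forms)).foldl
            (fun ps it => if matchB word it.2 then ps ++ [it.1] else ps) []))
        PySem.Dict.empty).getD w []) = posIdx w (surfaces ++ dict_forms) :=
    fun w hw => getD_foldl_insert_mem (fun word => posIdx word (surfaces ++ dict_forms))
      words PySem.Dict.empty w hw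
  have hguard : (words.all fun word => !(((words.foldl (fun d word => d.insert word
          ((PySem.List.enumerate (surfaces ++ dict_forms)).foldl
            (fun ps it => if matchB word it.2 then ps ++ [it.1] else ps) []))
        PySem.Dict.empty)).getD word []).isEmpty)
      = ((words.map fun w => (surfaces ++ dict_forms).map fun t => matchB w t).all
          fun f => f.any id) := by
    rw [List.all_map, Bool.eq_iff_iff, List.all_eq_true, List.all_eq_true]
    refine forall_congr' (fun w => ?_)
    constructor <;> intro h hw
    · have h' := h hw
      rw [Bool.not_eq_true', hdict w hw] at h'
      exact (posIdx_isEmpty_iff w _).1 h'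
    · have h' := h hw
      rw [Bool.not_eq_true', hdict w hw]
      exact (posIdx_isEmpty_iff w _).2 h'
  rw [hguard]
  by_cases hg : ((words.map fun w => (surfaces ++ dict_forms).map fun t => matchB w t).all
      fun f => f.any id) = true
  · rw [hg]
    simp only [Bool.not_true, Bool.false_eq_true, if_false]
    exact Bool.eq_iff_iff.mpr
      ((aside_iff _ words (surfaces ++ dict_forms) distance backward hdict).trans
        (bside_iff words (surfaces ++ dict_forms) distance backward).symm)
  · rw [Bool.not_eq_true] at hg
    rw [hg]
    simp
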